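-- pv_equiv track=rewrite | github.com/Ruppin-SmartTransportation/TrafficLab | backend/services/sumo_service.py | _is_express_edge
-- ===== SOURCE A (Python) =====
-- def _is_express_edge(edge_id):
--     """
--     Check if an edge is an express edge based on naming patterns
--     """
--     # Express edges are the main connecting roads between zones
--     # They typically start with -E or E
--     if edge_id.startswith('-E') or edge_id.startswith('E'):
--         return True
--
--     # Also check for cross-zone connections (edges that connect different zones)
--     express_patterns = [
--         # Diagonal connections between zones
--         'BI', 'BH', 'BG', 'BF', 'BE', 'BD', 'BC', 'BA', 'BB',
--         # Cross-zone connections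
--         'AQ', 'AP', 'AO', 'AN', 'AM', 'AL', 'AK', 'AJ', 'AI', 'AH', 'AG', 'AF', 'AE', 'AD', 'AC', 'AB', 'AA'
--     ]
--
--     # Check if edge connects different zones (not internal to a zone)
--     for pattern in express_patterns:
--         if edge_id.startswith(pattern) and len(edge_id) > 3:
--             return True
--     return False
-- ===== SOURCE B (Python) =====
-- def _is_express_edge(edge_id):
--     # Fast path: express edges start with -E or E
--     if edge_id.startswith('-E') or edge_id.startswith('E'):
--         return True
--     # The pattern table in A is exactly the contiguous ranges BA..BI and AA..AQ:
--     # closed-form test on the first two characters instead of scanning the table.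
--     if len(edge_id) <= 3:
--         return False
--     c0, c1 = edge_id[0], edge_id[1]
--     return (c0 == 'A' and 'A' <= c1 <= 'Q') or (c0 == 'B' and 'A' <= c1 <= 'I')
-- ===== Notes on version B (the rewrite author's own statement) =====
-- stated objective: simpler
-- what changed: Replaced the 26-entry prefix table and its scanning loop by a closed-form character-range test on the first two characters (the table is exactly the contiguous ranges BA..BI and AA..AQ).
import Mathlib
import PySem

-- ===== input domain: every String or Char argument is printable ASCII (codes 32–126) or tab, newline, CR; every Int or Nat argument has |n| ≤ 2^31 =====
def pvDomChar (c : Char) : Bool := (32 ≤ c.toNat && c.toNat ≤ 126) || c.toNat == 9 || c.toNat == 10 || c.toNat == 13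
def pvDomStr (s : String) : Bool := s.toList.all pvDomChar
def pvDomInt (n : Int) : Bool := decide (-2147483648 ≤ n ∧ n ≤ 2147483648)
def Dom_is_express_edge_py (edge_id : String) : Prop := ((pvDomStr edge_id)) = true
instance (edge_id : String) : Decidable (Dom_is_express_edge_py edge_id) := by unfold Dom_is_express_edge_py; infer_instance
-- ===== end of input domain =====

-- B replaces A's 26-entry prefix table and its scanning loop by a closed-form
-- character-range test on the first two characters (objective: simpler).

-- ===== PORT A =====
def expressPatterns : List String :=
  ["BI", "BH", "BG", "BF", "BE", "BD", "BC", "BA", "BB",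
   "AQ", "AP", "AO", "AN", "AM", "AL", "AK", "AJ", "AI", "AH", "AG", "AF", "AE", "AD", "AC", "AB", "AA"]

def is_express_edge_py (edge_id : String) : Bool :=
  if PySem.Str.startswith edge_id "-E" || PySem.Str.startswith edge_id "E" then
    true
  else
    -- the Python for-loop with early return = List.any over the pattern table
    expressPatterns.any (fun p => PySem.Str.startswith edge_id p && decide (3 < PySem.Str.len edge_id))

-- ===== PORT B =====
def is_express_edge_py_alt (edge_id : String) : Bool :=
  if PySem.Str.startswith edge_id "-E" || PySem.Str.startswith edge_id "E" then
    true
  else if PySem.Str.len edge_id ≤ 3 then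
    false
  else
    match edge_id.toList with
    | c0 :: c1 :: _ =>
        (c0 == 'A' && decide ('A' ≤ c1) && decide (c1 ≤ 'Q')) ||
        (c0 == 'B' && decide ('A' ≤ c1) && decide (c1 ≤ 'I'))
    | _ => false

-- ===== PRECONDITION & SPEC =====
def Spec_is_express_edge_py (edge_id : String) (out : Bool) : Prop := out = is_express_edge_py_alt edge_id
instance (edge_id : String) (out : Bool) : Decidable (Spec_is_express_edge_py edge_id out) := by unfold Spec_is_express_edge_py; infer_instance

-- ===== CLAIM (what is proved, stated in full; the proofs are below) =====
def Claim_equal_is_express_edge_py : Prop := ∀ (edge_id : String), Dom_is_express_edge_py edge_id → Spec_is_express_edge_py edge_id (is_express_edge_py edge_id)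

-- ===== LEMMAS AND PROOFS =====

theorem char_eq_iff (b c : Char) : b = c ↔ b.val.toNat = c.val.toNat :=
  ⟨fun h => h ▸ rfl, fun h => Char.ext (UInt32.toNat_inj.mp h)⟩

theorem range_AI (b : Char) : ('A' ≤ b ∧ b ≤ 'I') ↔ (b='A' ∨ b='B' ∨ b='C' ∨ b='D' ∨ b='E' ∨ b='F' ∨ b='G' ∨ b='H' ∨ b='I') := by
  simp only [Char.le_def, UInt32.le_iff_toNat_le, char_eq_iff, show ('A'.val.toNat = 65) from rfl, show ('B'.val.toNat = 66) from rfl, show ('C'.val.toNat = 67) from rfl, show ('D'.val.toNat = 68) from rfl, show ('E'.val.toNat = 69) from rfl, show ('F'.val.toNat = 70) from rfl, show ('G'.val.toNat = 71) from rfl, show ('H'.val.toNat = 72) from rfl, show ('I'.val.toNat = 73) from rfl]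
  omega

theorem range_AQ (b : Char) : ('A' ≤ b ∧ b ≤ 'Q') ↔ (b='A' ∨ b='B' ∨ b='C' ∨ b='D' ∨ b='E' ∨ b='F' ∨ b='G' ∨ b='H' ∨ b='I' ∨ b='J' ∨ b='K' ∨ b='L' ∨ b='M' ∨ b='N' ∨ b='O' ∨ b='P' ∨ b='Q') := by
  simp only [Char.le_def, UInt32.le_iff_toNat_le, char_eq_iff, show ('A'.val.toNat = 65) from rfl, show ('B'.val.toNat = 66) from rfl, show ('C'.val.toNat = 67) from rfl, show ('D'.val.toNat = 68) from rfl, show ('E'.val.toNat = 69) from rfl, show ('F'.val.toNat = 70) from rfl, show ('G'.val.toNat = 71) from rfl, show ('H'.val.toNat = 72) from rfl, show ('I'.val.toNat = 73) from rfl, show ('J'.val.toNat = 74) from rfl, show ('K'.val.toNat = 75) from rfl, show ('L'.val.toNat = 76) from rfl, show ('M'.val.toNat = 77) from rfl, show ('N'.val.toNat = 78) from rfl, show ('O'.val.toNat = 79) from rfl, show ('P'.val.toNat = 80) from rfl, show ('Q'.val.toNat = 81) from rfl]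
  omega

-- the pattern table of A is exactly the two ranges of B
theorem express_core (a b : Char) :
    ('B' = a ∧ 'I' = b ∨ 'B' = a ∧ 'H' = b ∨ 'B' = a ∧ 'G' = b ∨ 'B' = a ∧ 'F' = b ∨ 'B' = a ∧ 'E' = b ∨ 'B' = a ∧ 'D' = b ∨ 'B' = a ∧ 'C' = b ∨ 'B' = a ∧ 'A' = b ∨ 'B' = a ∧ 'B' = b ∨ 'A' = a ∧ 'Q' = b ∨ 'A' = a ∧ 'P' = b ∨ 'A' = a ∧ 'O' = b ∨ 'A' = a ∧ 'N' = b ∨ 'A' = a ∧ 'M' = b ∨ 'A' = a ∧ 'L' = b ∨ 'A' = a ∧ 'K' = b ∨ 'A' = a ∧ 'J' = b ∨ 'A' = a ∧ 'I' = b ∨ 'A' = a ∧ 'H' = b ∨ 'A' = a ∧ 'G' = b ∨ 'A' = a ∧ 'F' = b ∨ 'A' = a ∧ 'E' = b ∨ 'A' = a ∧ 'D' = b ∨ 'A' = a ∧ 'C' = b ∨ 'A' = a ∧ 'B' = b ∨ 'A' = a ∧ 'A' = b) ↔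
    (a = 'A' ∧ 'A' ≤ b ∧ b ≤ 'Q' ∨ a = 'B' ∧ 'A' ≤ b ∧ b ≤ 'I') := by
  constructor
  · rintro (⟨rfl,rfl⟩|⟨rfl,rfl⟩|⟨rfl,rfl⟩|⟨rfl,rfl⟩|⟨rfl,rfl⟩|⟨rfl,rfl⟩|⟨rfl,rfl⟩|⟨rfl,rfl⟩|⟨rfl,rfl⟩|⟨rfl,rfl⟩|⟨rfl,rfl⟩|⟨rfl,rfl⟩|⟨rfl,rfl⟩|⟨rfl,rfl⟩|⟨rfl,rfl⟩|⟨rfl,rfl⟩|⟨rfl,rfl⟩|⟨rfl,rfl⟩|⟨rfl,rfl⟩|⟨rfl,rfl⟩|⟨rfl,rfl⟩|⟨rfl,rfl⟩|⟨rfl,rfl⟩|⟨rfl,rfl⟩|⟨rfl,rfl⟩|⟨rfl,rfl⟩) <;> decide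
  · rintro (⟨rfl, hb⟩ | ⟨rfl, hb⟩)
    · rcases (range_AQ b).mp hb with (rfl|rfl|rfl|rfl|rfl|rfl|rfl|rfl|rfl|rfl|rfl|rfl|rfl|rfl|rfl|rfl|rfl) <;> decide
    · rcases (range_AI b).mp hb with (rfl|rfl|rfl|rfl|rfl|rfl|rfl|rfl|rfl) <;> decide

set_option maxHeartbeats 1000000 in
theorem list_eq (l : List Char) :
    (if (PySem.Chars.startswith l "-E".toList || PySem.Chars.startswith l "E".toList) = true then true
     else expressPatterns.any fun p => PySem.Chars.startswith l p.toList && decide (3 < (l.length : Int)))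
  = (if (PySem.Chars.startswith l "-E".toList || PySem.Chars.startswith l "E".toList) = true then true
     else if (l.length : Int) ≤ 3 then false
     else match l with
       | c0 :: c1 :: _ =>
          c0 == 'A' && decide ('A' ≤ c1) && decide (c1 ≤ 'Q') || c0 == 'B' && decide ('A' ≤ c1) && decide (c1 ≤ 'I')
       | _ => false) := by
  rcases l with _ | ⟨a, _ | ⟨b, _ | ⟨c, _ | ⟨d, t⟩⟩⟩⟩
  · simp [PySem.Chars.startswith, expressPatterns]
  · simp [PySem.Chars.startswith, expressPatterns]
  · simp [PySem.Chars.startswith, expressPatterns]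
  · simp [PySem.Chars.startswith, expressPatterns]
  · by_cases hc : (PySem.Chars.startswith (a::b::c::d::t) "-E".toList || PySem.Chars.startswith (a::b::c::d::t) "E".toList) = true
    · rw [if_pos hc, if_pos hc]
    · rw [if_neg hc, if_neg hc]
      have h3 : decide ((3:Int) < (((a::b::c::d::t) : List Char).length : Int)) = true := by
        simp only [decide_eq_true_eq, List.length_cons]; push_cast; omega
      have h4 : ¬((((a::b::c::d::t) : List Char).length : Int) ≤ 3) := by
        simp only [List.length_cons]; push_cast; omega
      rw [if_neg h4]
      simp only [expressPatterns, List.any_cons, List.any_nil, h3, Bool.and_true, Bool.or_false]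
      rw [Bool.eq_iff_iff]
      simp only [Bool.or_eq_true, Bool.and_eq_true, beq_iff_eq, decide_eq_true_eq, and_assoc,
        PySem.Chars.startswith, List.isPrefixOf, Bool.and_true,
        show "BI".toList = ['B','I'] from rfl,
        show "BH".toList = ['B','H'] from rfl,
        show "BG".toList = ['B','G'] from rfl,
        show "BF".toList = ['B','F'] from rfl,
        show "BE".toList = ['B','E'] from rfl,
        show "BD".toList = ['B','D'] from rfl,
        show "BC".toList = ['B','C'] from rfl,
        show "BA".toList = ['B','A'] from rfl,
        show "BB".toList = ['B','B'] from rfl,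
        show "AQ".toList = ['A','Q'] from rfl,
        show "AP".toList = ['A','P'] from rfl,
        show "AO".toList = ['A','O'] from rfl,
        show "AN".toList = ['A','N'] from rfl,
        show "AM".toList = ['A','M'] from rfl,
        show "AL".toList = ['A','L'] from rfl,
        show "AK".toList = ['A','K'] from rfl,
        show "AJ".toList = ['A','J'] from rfl,
        show "AI".toList = ['A','I'] from rfl,
        show "AH".toList = ['A','H'] from rfl,
        show "AG".toList = ['A','G'] from rfl,
        show "AF".toList = ['A','F'] from rfl,
        show "AE".toList = ['A','E'] from rfl,
        show "AD".toList = ['A','D'] from rfl,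
        show "AC".toList = ['A','C'] from rfl,
        show "AB".toList = ['A','B'] from rfl,
        show "AA".toList = ['A','A'] from rfl]
      exact express_core a b

theorem is_express_edge_eq (s : String) : is_express_edge_py s = is_express_edge_py_alt s := by
  unfold is_express_edge_py is_express_edge_py_alt
  simp only [PySem.Str.startswith_eq, PySem.Str.len_eq]
  exact list_eq s.toList

-- ===== VERDICT (by name: the statement is the Claim_ definition above) =====
theorem is_express_edge_py_spec : Claim_equal_is_express_edge_py := by
  intro s _
  unfold Spec_is_express_edge_py
  exact is_express_edge_eq s
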